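-- pv_equiv track=rewrite | github.com/aki2274/KOnezumi-AID | src/nominate_candidate_stopcodon/translate_idex_in_exon_to_orf.py | get_candidate_stopcodon_exon_num
-- ===== SOURCE A (Python) =====
-- def get_candidate_stopcodon_exon_num(
--     candidate_stopcodon_index_inexon: list[int], exon_range_list
-- ):
--     # 何番目のエクソンであるかのリストを作成
--     exon_index_list = []
--     for t in range(len(candidate_stopcodon_index_inexon)):
--         for s in range(len(exon_range_list)):
--             if (
--                 exon_range_list[s][0]
--                 <= candidate_stopcodon_index_inexon[t]
--                 <= exon_range_list[s][1]
--             ):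
--                 exon_index_list.append(s)
--     return exon_index_list
-- ===== SOURCE B (Python) =====
-- def get_candidate_stopcodon_exon_num(
--     candidate_stopcodon_index_inexon: list[int], exon_range_list
-- ):
--     # Transposed traversal: one outer pass over the exon ranges, keeping a
--     # bucket of matching range numbers per candidate, concatenated at the end.
--     buckets = [[] for _ in candidate_stopcodon_index_inexon]
--     for s, (lo, hi) in enumerate(exon_range_list):
--         for b, x in zip(buckets, candidate_stopcodon_index_inexon):
--             if lo <= x <= hi:
--                 b.append(s)
--     out = []
--     for b in buckets:
--         out += b
--     return out
-- ===== Notes on version B (the rewrite author's own statement) =====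
-- stated objective: alternative
-- what changed: B transposes the traversal: instead of scanning all exon ranges once per candidate, it makes one outer pass over the exon ranges maintaining a per-candidate bucket of matching range numbers, then concatenates the buckets.
import Mathlib
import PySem

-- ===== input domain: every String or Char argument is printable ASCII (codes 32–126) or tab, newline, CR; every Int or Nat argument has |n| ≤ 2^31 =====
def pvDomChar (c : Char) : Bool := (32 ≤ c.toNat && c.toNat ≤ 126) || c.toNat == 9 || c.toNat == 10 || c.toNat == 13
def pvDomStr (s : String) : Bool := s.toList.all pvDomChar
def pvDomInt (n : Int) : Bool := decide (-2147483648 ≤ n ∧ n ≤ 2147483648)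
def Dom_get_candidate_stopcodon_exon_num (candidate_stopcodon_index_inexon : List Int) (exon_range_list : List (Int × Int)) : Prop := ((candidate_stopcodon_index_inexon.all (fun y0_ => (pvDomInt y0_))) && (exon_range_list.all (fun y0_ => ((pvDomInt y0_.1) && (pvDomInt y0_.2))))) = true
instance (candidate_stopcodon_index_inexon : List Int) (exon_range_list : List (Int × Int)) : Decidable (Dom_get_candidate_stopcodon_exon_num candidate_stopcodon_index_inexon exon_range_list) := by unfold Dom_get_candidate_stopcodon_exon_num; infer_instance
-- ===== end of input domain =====

-- B replaces A's per-candidate scan of all ranges by one outer pass over the ranges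
-- maintaining per-candidate buckets (a different traversal order; same cost).

-- ===== PORT A =====
def get_candidate_stopcodon_exon_num (candidate_stopcodon_index_inexon : List Int) (exon_range_list : List (Int × Int)) : List Int :=
  (PySem.List.pyRange 0 candidate_stopcodon_index_inexon.length 1).foldl (fun acc t =>
    (PySem.List.pyRange 0 exon_range_list.length 1).foldl (fun acc2 s =>
      if (PySem.List.pyGetD exon_range_list s (0, 0)).1 ≤ PySem.List.pyGetD candidate_stopcodon_index_inexon t 0 ∧
         PySem.List.pyGetD candidate_stopcodon_index_inexon t 0 ≤ (PySem.List.pyGetD exon_range_list s (0, 0)).2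
      then acc2 ++ [s] else acc2) acc) []

-- ===== PORT B =====
def get_candidate_stopcodon_exon_num_alt (candidate_stopcodon_index_inexon : List Int) (exon_range_list : List (Int × Int)) : List Int :=
  let buckets : List (List Int) :=
    (PySem.List.enumerate exon_range_list 0).foldl
      (fun bks sr =>
        (bks.zip candidate_stopcodon_index_inexon).map
          (fun bx => if sr.2.1 ≤ bx.2 ∧ bx.2 ≤ sr.2.2 then bx.1 ++ [sr.1] else bx.1))
      (candidate_stopcodon_index_inexon.map (fun _ => []))
  buckets.foldl (fun out b => out ++ b) []

-- ===== PRECONDITION & SPEC =====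
def Spec_get_candidate_stopcodon_exon_num (candidate_stopcodon_index_inexon : List Int) (exon_range_list : List (Int × Int)) (out : List Int) : Prop := out = get_candidate_stopcodon_exon_num_alt candidate_stopcodon_index_inexon exon_range_list
instance (candidate_stopcodon_index_inexon : List Int) (exon_range_list : List (Int × Int)) (out : List Int) : Decidable (Spec_get_candidate_stopcodon_exon_num candidate_stopcodon_index_inexon exon_range_list out) := by unfold Spec_get_candidate_stopcodon_exon_num; infer_instance

-- ===== CLAIM (what is proved, stated in full; the proofs are below) =====
def Claim_equal_get_candidate_stopcodon_exon_num : Prop := ∀ (candidate_stopcodon_index_inexon : List Int) (exon_range_list : List (Int × Int)), Dom_get_candidate_stopcodon_exon_num candidate_stopcodon_index_inexon exon_range_list → Spec_get_candidate_stopcodon_exon_num candidate_stopcodon_index_inexon exon_range_list (get_candidate_stopcodon_exon_num candidate_stopcodon_index_inexon exon_range_list)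

-- ===== LEMMAS AND PROOFS =====

-- The per-candidate list of matching range numbers, in enumerate form.
def pvMatches (ps : List (Int × (Int × Int))) (x : Int) : List Int :=
  (ps.filter (fun sr => decide (sr.2.1 ≤ x ∧ x ≤ sr.2.2))).map (·.1)

theorem pv_zip_self {α β : Type} (l : List α) (f : α → β) :
    (l.map f).zip l = l.map (fun x => (f x, x)) := by
  induction l with
  | nil => rfl
  | cons a l ih => simp [ih]

-- B's bucket-updating fold, characterised pointwise.
theorem pv_buckets_fold (cand : List Int) (ps : List (Int × (Int × Int))) (g : Int → List Int) :
    ps.foldl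
      (fun bks sr =>
        (bks.zip cand).map
          (fun bx => if sr.2.1 ≤ bx.2 ∧ bx.2 ≤ sr.2.2 then bx.1 ++ [sr.1] else bx.1))
      (cand.map g)
    = cand.map (fun x => g x ++ pvMatches ps x) := by
  induction ps generalizing g with
  | nil => simp [pvMatches]
  | cons sr ps ih =>
    simp only [List.foldl_cons]
    rw [pv_zip_self cand g, List.map_map]
    have hstep : ((fun bx : List Int × Int => if sr.2.1 ≤ bx.2 ∧ bx.2 ≤ sr.2.2 then bx.1 ++ [sr.1] else bx.1) ∘ fun x => (g x, x))
        = fun x => (g x ++ if sr.2.1 ≤ x ∧ x ≤ sr.2.2 then [sr.1] else []) := by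
      funext x; by_cases h : sr.2.1 ≤ x ∧ x ≤ sr.2.2 <;> simp [h]
    rw [hstep, ih]
    apply List.map_congr_left
    intro x _
    by_cases h : sr.2.1 ≤ x ∧ x ≤ sr.2.2 <;> simp [pvMatches, h]

-- A, rewritten as a flatMap of per-candidate matches.
theorem pv_A_eq (cand : List Int) (ranges : List (Int × Int)) :
    get_candidate_stopcodon_exon_num cand ranges
      = cand.flatMap (fun x => pvMatches (PySem.List.enumerate ranges 0) x) := by
  unfold get_candidate_stopcodon_exon_num
  rw [PySem.List.foldl_pyRange_zero_pyGetD' cand 0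
    (fun acc x =>
      (PySem.List.pyRange 0 (ranges.length : Int) 1).foldl
        (fun acc2 s =>
          if (PySem.List.pyGetD ranges s (0, 0)).1 ≤ x ∧ x ≤ (PySem.List.pyGetD ranges s (0, 0)).2
          then acc2 ++ [s] else acc2) acc) []]
  have hinner : (fun acc x =>
      (PySem.List.pyRange 0 (ranges.length : Int) 1).foldl
        (fun acc2 s =>
          if (PySem.List.pyGetD ranges s (0, 0)).1 ≤ x ∧ x ≤ (PySem.List.pyGetD ranges s (0, 0)).2
          then acc2 ++ [s] else acc2) acc)
      = fun (acc : List Int) (x : Int) =>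
          acc ++ pvMatches (PySem.List.enumerate ranges 0) x := by
    funext acc x
    rw [PySem.List.foldl_append_ite_eq_filter]
    congr 1
    rw [pvMatches, PySem.List.enumerate_eq_map_pyRange ranges ((0 : Int), (0 : Int)), List.filter_map,
      List.map_map]
    simp [Function.comp_def]
  rw [hinner, PySem.List.foldl_append_eq_flatMap]
  simp

-- ===== VERDICT (by name: the statement is the Claim_ definition above) =====
theorem get_candidate_stopcodon_exon_num_spec : Claim_equal_get_candidate_stopcodon_exon_num := by
  intro cand ranges _
  unfold Spec_get_candidate_stopcodon_exon_num get_candidate_stopcodon_exon_num_alt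
  rw [pv_A_eq]
  rw [pv_buckets_fold cand (PySem.List.enumerate ranges 0) (fun _ => [])]
  rw [PySem.List.foldl_append_eq_flatten]
  simp [List.flatMap]
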